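-- pv_equiv track=rewrite | github.com/hffan/yjy015_prj | sys_interface/sys_str.py | find_last_dir
-- ===== SOURCE A (Python) =====
-- def find_last_dir(path):
--     if(''==path.rsplit("/",1)[-1]):
--         path=path.rsplit("/",1)[-2]
--     else:
--         dir = path.rsplit("/",1)[-1]
--         rootpath = path.rsplit("/",1)[-2]
--         return rootpath,dir
--     #print (path)
--     return find_last_dir(path)
-- ===== SOURCE B (Python) =====
-- def find_last_dir(path):
--     # Strip all trailing slashes at once, then split once at the last '/'.
--     p = path.rstrip('/')
--     rootpath, dir = p.rsplit('/', 1)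
--     return rootpath, dir
-- ===== Notes on version B (the rewrite author's own statement) =====
-- stated objective: simpler
-- what changed: Replaces A's tail recursion (four rsplit calls per level, peeling one trailing '/' per call) with a single rstrip('/') followed by one rsplit('/',1).
import Mathlib
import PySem

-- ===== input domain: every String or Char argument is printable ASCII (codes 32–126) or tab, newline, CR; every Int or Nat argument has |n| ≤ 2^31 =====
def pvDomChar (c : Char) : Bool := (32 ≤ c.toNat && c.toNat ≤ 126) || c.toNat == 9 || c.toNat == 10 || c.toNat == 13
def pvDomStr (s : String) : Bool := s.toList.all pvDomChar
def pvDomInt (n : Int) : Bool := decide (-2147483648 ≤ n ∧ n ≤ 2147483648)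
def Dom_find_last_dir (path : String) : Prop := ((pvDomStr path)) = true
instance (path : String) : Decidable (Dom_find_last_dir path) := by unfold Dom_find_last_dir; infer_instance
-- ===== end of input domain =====

-- B replaces A's tail recursion (one trailing '/' peeled per rsplit round) by one rstrip('/') plus one rsplit('/',1); equivalence is about the return value.

-- ===== PORT A =====
-- path.rsplit("/",1)[-1]: the segment after the LAST '/' (the whole string if no '/').
def pvLastSeg (l : List Char) : List Char := (l.reverse.takeWhile (· ≠ '/')).reverse
-- path.rsplit("/",1)[-2]: the part before the last '/'; only exists when '/' ∈ l (else Python raises IndexError).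
def pvBeforeSeg (l : List Char) : List Char := ((l.reverse.dropWhile (· ≠ '/')).drop 1).reverse

-- A's recursion; `none` = the IndexError raised by rsplit("/",1)[-2] when there is no '/'.
def pvFindA (l : List Char) : Option (List Char × List Char) :=
  if pvLastSeg l = [] then
    if h : '/' ∈ l then pvFindA (pvBeforeSeg l) else none
  else
    if '/' ∈ l then some (pvBeforeSeg l, pvLastSeg l) else none
termination_by l.length
decreasing_by
  simp only [pvBeforeSeg, List.length_reverse, List.length_drop]
  have h1 : (l.reverse.dropWhile (· ≠ '/')).length ≤ l.length := by
    simpa using List.length_dropWhile_le (p := (· ≠ '/')) (l := l.reverse)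
  have h2 : l.reverse.dropWhile (· ≠ '/') ≠ [] := by
    intro hnil
    have h5 := (List.dropWhile_eq_nil_iff).mp hnil '/' ((List.mem_reverse).mpr h)
    simp at h5
  have h3 : 0 < (l.reverse.dropWhile (· ≠ '/')).length := List.length_pos_of_ne_nil h2
  omega

def find_last_dir (path : String) : String × String :=
  match pvFindA path.toList with
  | some (rootpath, dir) => (String.mk rootpath, String.mk dir)
  | none => ("", "")   -- unreachable under Pre_ (Python raises IndexError here)

-- ===== PORT B =====
-- p.rsplit('/', 1) unpacked into (rootpath, dir); `none` = ValueError when p has no '/'.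
def pvRsplitLast (p : List Char) : Option (List Char × List Char) :=
  if '/' ∈ p then
    some (((p.reverse.dropWhile (· ≠ '/')).drop 1).reverse, (p.reverse.takeWhile (· ≠ '/')).reverse)
  else none

def find_last_dir_alt (path : String) : String × String :=
  let p := (path.toList.reverse.dropWhile (· == '/')).reverse   -- path.rstrip('/')
  match pvRsplitLast p with
  | some (rootpath, dir) => (String.mk rootpath, String.mk dir)
  | none => ("", "")   -- unreachable under Pre_ (Python raises ValueError here)

-- ===== PRECONDITION & SPEC =====
-- Pre_ excludes exactly the inputs on which A raises IndexError: strings that, after removing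
-- trailing '/' characters, contain no '/' (B raises ValueError there too).
def Pre_find_last_dir (path : String) : Prop :=
  '/' ∈ path.toList.reverse.dropWhile (· == '/')
instance (path : String) : Decidable (Pre_find_last_dir path) := by unfold Pre_find_last_dir; infer_instance
def pvWitness_find_last_dir : String := "a/b/"

def Spec_find_last_dir (path : String) (out : String × String) : Prop := out = find_last_dir_alt path
instance (path : String) (out : String × String) : Decidable (Spec_find_last_dir path out) := by unfold Spec_find_last_dir; infer_instance

-- ===== CLAIM (what is proved, stated in full; the proofs are below) =====
def Claim_equal_find_last_dir : Prop := ∀ (path : String), Dom_find_last_dir path → Pre_find_last_dir path → Spec_find_last_dir path (find_last_dir path)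

-- ===== LEMMAS AND PROOFS =====

-- Core: on the reversed character list, A's recursion computes exactly "strip leading slashes
-- of the reversed list, then split at its first '/'".
theorem pvFindA_rev (r : List Char) (h : '/' ∈ r.dropWhile (· == '/')) :
    pvFindA r.reverse =
      some (pvBeforeSeg (r.dropWhile (· == '/')).reverse,
            pvLastSeg (r.dropWhile (· == '/')).reverse) := by
  induction r with
  | nil => simp at h
  | cons c r' ih =>
    by_cases hc : c = '/'
    · subst hc
      have hd : (('/' : Char) :: r').dropWhile (· == '/') = r'.dropWhile (· == '/') := by
        simp [List.dropWhile_cons]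
      rw [hd] at h ⊢
      have hmem : '/' ∈ ('/' : Char) :: r' := List.mem_cons_self
      rw [pvFindA]
      have hls : pvLastSeg (('/' : Char) :: r').reverse = [] := by
        simp [pvLastSeg, List.takeWhile_cons]
      have hmem' : '/' ∈ (('/' : Char) :: r').reverse := (List.mem_reverse).mpr hmem
      rw [if_pos (by simpa using hls)]
      rw [dif_pos hmem']
      have hbs : pvBeforeSeg (('/' : Char) :: r').reverse = r'.reverse := by
        simp [pvBeforeSeg, List.dropWhile_cons]
      rw [hbs]
      exact ih h
    · have hd : (c :: r').dropWhile (· == '/') = c :: r' := by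
        simp [List.dropWhile_cons, hc]
      rw [hd] at h ⊢
      have hmem' : '/' ∈ (c :: r').reverse := (List.mem_reverse).mpr h
      rw [pvFindA]
      have hls : pvLastSeg (c :: r').reverse ≠ [] := by
        simp [pvLastSeg, List.takeWhile_cons, hc]
      rw [if_neg hls, if_pos hmem']

theorem find_last_dir_spec : Claim_equal_find_last_dir := by
  intro path _ hpre
  unfold Spec_find_last_dir
  unfold Pre_find_last_dir at hpre
  have hmain := pvFindA_rev path.toList.reverse (by simpa using hpre)
  unfold find_last_dir find_last_dir_alt pvRsplitLast
  rw [List.reverse_reverse] at hmain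
  rw [hmain]
  have hmem : '/' ∈ (path.toList.reverse.dropWhile (· == '/')).reverse := by
    simpa using hpre
  simp only [if_pos hmem]
  rfl
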